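-- pv_equiv track=rewrite | github.com/zxbell/AI_Server_Simple | funcs.py | dist_list
-- ===== SOURCE A (Python) =====
-- def dist(pt1, pt2):  # 计算两点间xy两个方向的大值，比算距离快一些
--     dx = abs(pt1[0] - pt2[0])
--     dy = abs(pt1[1] - pt2[1])
--     if dx > dy:
--         return dx
--     else:
--         return dy
--
-- def dist_list(pts):  # 计算点序列所有点之间的距离
--     lenth = len(pts)
--     dists = [0]*(lenth * lenth)
--     index = 0
--     max_dist = -100
--     for pt1 in pts:
--         for i in range(index, lenth):
--             dst = dist(pt1, pts[i])
--             if dst > max_dist: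
--                 max_dist = dst
--             dists[index * lenth + i] = dst
--         index = index + 1
--     return max_dist, dists
-- ===== SOURCE B (Python) =====
-- def dist_list(pts):  # closed-form max via coordinate ranges, plus a row-by-row build of the triangle
--     n = len(pts)
--     if n == 0:
--         return -100, []
--     xs = [p[0] for p in pts]
--     ys = [p[1] for p in pts]
--     max_dist = max(max(xs) - min(xs), max(ys) - min(ys))
--     rows = [[0] * i + [max(abs(pts[i][0] - pts[j][0]), abs(pts[i][1] - pts[j][1]))
--                        for j in range(i, n)]
--             for i in range(n)]
--     return max_dist, [d for row in rows for d in row]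
-- ===== Notes on version B (the rewrite author's own statement) =====
-- stated objective: alternative
-- what changed: B computes max_dist in closed form as max(max(xs)-min(xs), max(ys)-min(ys)) from one pass over the coordinates (no pairwise max scan at all, using that the max pairwise Chebyshev distance equals the larger coordinate range), and builds the distance list row by row (zero prefix + comprehension per row) then flattens, instead of A's fused in-place array fill with a running max.
import Mathlib
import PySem

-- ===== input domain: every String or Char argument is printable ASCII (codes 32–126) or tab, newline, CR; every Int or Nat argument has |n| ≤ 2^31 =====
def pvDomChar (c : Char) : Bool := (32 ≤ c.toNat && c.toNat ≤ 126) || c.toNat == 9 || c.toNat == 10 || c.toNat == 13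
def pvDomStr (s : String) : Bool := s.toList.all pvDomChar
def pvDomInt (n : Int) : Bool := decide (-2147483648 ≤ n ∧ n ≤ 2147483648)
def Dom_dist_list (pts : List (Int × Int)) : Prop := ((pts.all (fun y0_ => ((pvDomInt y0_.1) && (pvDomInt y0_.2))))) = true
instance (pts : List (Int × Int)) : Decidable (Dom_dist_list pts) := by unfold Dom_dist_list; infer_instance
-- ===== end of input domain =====

-- B computes max_dist in closed form from the coordinate ranges (max(xs)-min(xs) vs max(ys)-min(ys),
-- no pairwise scan) and builds the distance list row by row, then flattens — instead of A's
-- in-place flat-array fill with a fused running max.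

-- ===== PORT A =====
def distA (pt1 pt2 : Int × Int) : Int :=
  let dx := |pt1.1 - pt2.1|
  let dy := |pt1.2 - pt2.2|
  if dx > dy then dx else dy

-- pts[i] is ported with pyGetD: i ∈ range(index, lenth) is provably in range, so no IndexError arises
def dist_list (pts : List (Int × Int)) : Int × List Int :=
  let lenth := pts.length
  let dists : List Int := List.replicate (lenth * lenth) 0
  let st := pts.foldl (fun (st : List Int × Int × Int) pt1 =>
    let s := (PySem.List.pyRange st.2.1 (lenth : Int) 1).foldl
      (fun (s : List Int × Int) i =>
        let dst := distA pt1 (PySem.List.pyGetD pts i (0, 0))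
        let m := if dst > s.2 then dst else s.2
        (PySem.List.pySetD s.1 (st.2.1 * (lenth : Int) + i) dst, m))
      (st.1, st.2.2)
    (s.1, st.2.1 + 1, s.2)) (dists, 0, -100)
  (st.2.2, st.1)

-- ===== PORT B =====
def dist_list_alt (pts : List (Int × Int)) : Int × List Int :=
  let n := pts.length
  if n = 0 then (-100, [])
  else
    let xs := pts.map Prod.fst
    let ys := pts.map Prod.snd
    let mxx := match PySem.List.max? xs (fun v => v) with | some m => m | none => 0
    let mnx := match PySem.List.min? xs (fun v => v) with | some m => m | none => 0
    let mxy := match PySem.List.max? ys (fun v => v) with | some m => m | none => 0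
    let mny := match PySem.List.min? ys (fun v => v) with | some m => m | none => 0
    let max_dist := max (mxx - mnx) (mxy - mny)
    let rows := (PySem.List.pyRange 0 (n : Int) 1).map (fun i =>
      List.replicate i.toNat 0 ++ (PySem.List.pyRange i (n : Int) 1).map (fun j =>
        max |(PySem.List.pyGetD pts i (0, 0)).1 - (PySem.List.pyGetD pts j (0, 0)).1|
            |(PySem.List.pyGetD pts i (0, 0)).2 - (PySem.List.pyGetD pts j (0, 0)).2|))
    (max_dist, rows.flatMap (fun r => r))

-- ===== PRECONDITION & SPEC =====
def Spec_dist_list (pts : List (Int × Int)) (out : Int × List Int) : Prop := out = dist_list_alt pts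
instance (pts : List (Int × Int)) (out : Int × List Int) : Decidable (Spec_dist_list pts out) := by unfold Spec_dist_list; infer_instance

-- ===== CLAIM (what is proved, stated in full; the proofs are below) =====
def Claim_equal_dist_list : Prop := ∀ (pts : List (Int × Int)), Dom_dist_list pts → Spec_dist_list pts (dist_list pts)

-- ===== LEMMAS AND PROOFS =====

-- abbreviations used only by the proofs
def gP (pts : List (Int × Int)) (i : Int) : Int × Int := PySem.List.pyGetD pts i (0, 0)
def dP (pts : List (Int × Int)) (i j : Int) : Int := distA (gP pts i) (gP pts j)
-- entries A's inner loop writes in row i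
def rowE (pts : List (Int × Int)) (i : Int) : List Int :=
  (PySem.List.pyRange i (pts.length : Int) 1).map (dP pts i)
-- row i of the flat list, as a positionwise if
def rowB (pts : List (Int × Int)) (i : Int) : List Int :=
  (PySem.List.pyRange 0 (pts.length : Int) 1).map (fun j => if i ≤ j then dP pts i j else 0)
-- first k rows of the flat list
def FB (pts : List (Int × Int)) (k : Int) : List Int :=
  (PySem.List.pyRange 0 k 1).flatMap (rowB pts)
-- A's running max over rows a..n-1
def MF (pts : List (Int × Int)) (a m : Int) : Int :=
  (PySem.List.pyRange a (pts.length : Int) 1).foldl (fun acc i =>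
    (PySem.List.pyRange i (pts.length : Int) 1).foldl
      (fun a2 j => if dP pts i j > a2 then dP pts i j else a2) acc) m
-- the whole triangle, flattened
def TT (pts : List (Int × Int)) : List Int :=
  (PySem.List.pyRange 0 (pts.length : Int) 1).flatMap (rowE pts)

theorem len_rowB (pts : List (Int × Int)) (i : Int) : (rowB pts i).length = pts.length := by
  simp [rowB, PySem.List.length_pyRange_one]

theorem len_FB (pts : List (Int × Int)) (k : Nat) : (FB pts (k : Int)).length = k * pts.length := by
  induction k with
  | zero => simp [FB, PySem.List.pyRange_one_eq_nil]
  | succ k ih =>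
    have h : PySem.List.pyRange 0 ((k : Int) + 1) 1 = PySem.List.pyRange 0 (k : Int) 1 ++ [(k : Int)] := by
      exact PySem.List.pyRange_one_succ_right (by positivity)
    simp only [FB] at ih ⊢
    push_cast
    rw [h, List.flatMap_append, List.length_append, ih]
    simp [len_rowB, Nat.succ_mul]

theorem take_set_succ (Z : List Int) (v : Int) (p : Nat) (h : p < Z.length) :
    (Z.set p v).take (p + 1) = Z.take p ++ [v] := by
  rw [List.set_eq_take_cons_drop v h, List.take_append]
  simp [Nat.min_eq_left (Nat.le_of_lt h)]

theorem drop_set_ge (Z : List Int) (v : Int) (p q : Nat) (h : p < Z.length) (hq : p + 1 ≤ q) :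
    (Z.set p v).drop q = Z.drop q := by
  rw [List.set_eq_take_cons_drop v h, List.drop_append]
  simp only [List.length_take, Nat.min_eq_left (Nat.le_of_lt h)]
  rw [show q - p = (q - (p+1)) + 1 by omega]
  simp only [List.drop_succ_cons, List.drop_drop]
  rw [show p + 1 + (q - (p + 1)) = q by omega]
  simp
  omega

theorem inner_set (f : Int → Int) : ∀ (k : Nat) (a b c : Int) (Z : List Int) (m : Int),
    0 ≤ a → a ≤ b → k = (b - a).toNat → 0 ≤ c → (c + b).toNat ≤ Z.length →
    (PySem.List.pyRange a b 1).foldl (fun (s : List Int × Int) i =>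
        (PySem.List.pySetD s.1 (c + i) (f i), if f i > s.2 then f i else s.2)) (Z, m)
    = (Z.take (c + a).toNat ++ (PySem.List.pyRange a b 1).map f ++ Z.drop (c + b).toNat,
       (PySem.List.pyRange a b 1).foldl (fun acc i => if f i > acc then f i else acc) m) := by
  intro k
  induction k with
  | zero =>
    intro a b c Z m ha hab hk hc hlen
    have hba : b = a := by omega
    subst hba
    rw [PySem.List.pyRange_one_eq_nil (le_refl _)]
    simp [List.take_append_drop]
  | succ k ih =>
    intro a b c Z m ha hab hk hc hlen
    have hlt : a < b := by omega
    rw [PySem.List.pyRange_one_cons hlt]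
    simp only [List.foldl_cons, List.map_cons]
    have hp : (c + a).toNat < Z.length := by omega
    rw [show PySem.List.pySetD Z (c + a) (f a) = Z.set (c + a).toNat (f a) from PySem.List.pySetD_of_nonneg (i := c + a) Z (f a) (by omega)]
    rw [ih (a + 1) b c (Z.set (c + a).toNat (f a)) (if f a > m then f a else m)
      (by omega) (by omega) (by omega) hc (by simp; omega)]
    have h1 : (c + (a + 1)).toNat = (c + a).toNat + 1 := by omega
    rw [h1, take_set_succ Z (f a) _ hp,
        drop_set_ge Z (f a) _ _ hp (by omega)]
    simp

theorem rowB_eq (pts : List (Int × Int)) (i : Int) (h0 : 0 ≤ i) (hn : i ≤ (pts.length : Int)) :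
    rowB pts i = List.replicate i.toNat 0 ++ rowE pts i := by
  have hsplit := PySem.List.pyRange_one_append 0 i (pts.length : Int) h0 hn
  simp only [rowB, rowE, hsplit, List.map_append]
  congr 1
  · have h1 : (PySem.List.pyRange 0 i 1).map (fun j => if i ≤ j then dP pts i j else 0)
        = (PySem.List.pyRange 0 i 1).map (fun _ => (0 : Int)) := by
      apply List.map_congr_left
      intro j hj
      have := PySem.List.mem_pyRange_one.mp hj
      rw [if_neg (by omega)]
    rw [h1, List.map_const']
    simp [PySem.List.length_pyRange_one]
  · apply List.map_congr_left
    intro j hj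
    have := PySem.List.mem_pyRange_one.mp hj
    rw [if_pos (by omega)]

theorem take_app_add (P Z : List Int) (t : Nat) : (P ++ Z).take (P.length + t) = P ++ Z.take t := by
  rw [List.take_append]
  simp

theorem drop_app_add (P Z : List Int) (t : Nat) : (P ++ Z).drop (P.length + t) = Z.drop t := by
  rw [List.drop_append]
  simp

theorem FB_succ (pts : List (Int × Int)) (k : Nat) :
    FB pts ((k : Int) + 1) = FB pts (k : Int) ++ rowB pts (k : Int) := by
  simp only [FB]
  rw [PySem.List.pyRange_one_succ_right (by positivity), List.flatMap_append]
  simp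

-- the outer loop of A
theorem outerA (pts : List (Int × Int)) : ∀ (rest front : List (Int × Int)) (m : Int),
    pts = front ++ rest →
    rest.foldl (fun (st : List Int × Int × Int) pt1 =>
      let s := (PySem.List.pyRange st.2.1 (pts.length : Int) 1).foldl
        (fun (s : List Int × Int) i =>
          let dst := distA pt1 (PySem.List.pyGetD pts i (0, 0))
          let m := if dst > s.2 then dst else s.2
          (PySem.List.pySetD s.1 (st.2.1 * (pts.length : Int) + i) dst, m))
        (st.1, st.2.2)
      (s.1, st.2.1 + 1, s.2))
      (FB pts (front.length : Int) ++ List.replicate ((pts.length - front.length) * pts.length) 0,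
       (front.length : Int), m)
    = (FB pts (pts.length : Int), (pts.length : Int), MF pts (front.length : Int) m) := by
  intro rest
  induction rest with
  | nil =>
    intro front m hpts
    have hfl : front.length = pts.length := by rw [hpts]; simp
    simp only [List.foldl_nil, hfl, Nat.sub_self, Nat.zero_mul, List.replicate_zero,
      List.append_nil, MF, PySem.List.pyRange_one_eq_nil (le_refl _), List.foldl_nil]
  | cons pt rest' ih =>
    intro front m hpts
    have hk : front.length < pts.length := by rw [hpts]; simp
    set n := pts.length with hn
    set k := front.length with hkdef
    have hgp : PySem.List.pyGetD pts ((k : Nat) : Int) (0, 0) = pt := by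
      simp only [hpts, hkdef, PySem.List.pyGetD_natCast]
      simp [List.getD_eq_getElem?_getD]
    have hrowlen : n ≤ (n - k) * n := le_mul_of_one_le_left (Nat.zero_le n) (by omega)
    rw [List.foldl_cons]
    have H := inner_set (fun i => distA pt (PySem.List.pyGetD pts i (0, 0)))
      (((n : Int) - (k : Int)).toNat) (k : Int) (n : Int) ((k : Int) * (n : Int))
      (FB pts (k : Int) ++ List.replicate ((n - k) * n) 0) m
      (by positivity) (by exact_mod_cast Nat.le_of_lt hk) rfl (by positivity)
      (by
        simp only [List.length_append, List.length_replicate, len_FB, ← hn]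
        rw [show ((k : Int) * (n : Int) + (n : Int)) = (((k * n + n : Nat) : Int)) by
          push_cast; ring, Int.toNat_natCast]
        omega)
    beta_reduce at H
    dsimp only
    rw [H]
    dsimp only
    have htake : ((k : Int) * (n : Int) + (k : Int)).toNat = k * n + k := by
      rw [show ((k : Int) * (n : Int) + (k : Int)) = ((k * n + k : Nat) : Int) by
        push_cast; ring, Int.toNat_natCast]
    have hdrop : ((k : Int) * (n : Int) + (n : Int)).toNat = k * n + n := by
      rw [show ((k : Int) * (n : Int) + (n : Int)) = ((k * n + n : Nat) : Int) by
        push_cast; ring, Int.toNat_natCast]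
    have hFBlen : (FB pts (k : Int)).length = k * n := len_FB pts k
    rw [htake, hdrop,
        show k * n + k = (FB pts (k : Int)).length + k by rw [hFBlen],
        show k * n + n = (FB pts (k : Int)).length + n by rw [hFBlen],
        take_app_add, drop_app_add, List.take_replicate, List.drop_replicate,
        Nat.min_eq_left (by omega),
        show (n - k) * n - n = (n - (k + 1)) * n by
          rw [Nat.sub_mul, Nat.sub_mul, Nat.add_mul, Nat.one_mul]; omega]
    have hmap : (PySem.List.pyRange (k : Int) (n : Int) 1).map
        (fun i => distA pt (PySem.List.pyGetD pts i (0, 0))) = rowE pts (k : Int) := by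
      simp only [rowE, ← hn]
      congr 1
      funext i
      simp only [dP, gP, hgp]
    have hrow : List.replicate k (0 : Int) ++ rowE pts (k : Int) = rowB pts (k : Int) := by
      rw [rowB_eq pts (k : Int) (by positivity) (by exact_mod_cast Nat.le_of_lt hk)]
      simp
    have hlist : FB pts (k : Int) ++ List.replicate k (0 : Int) ++
        (PySem.List.pyRange (k : Int) (n : Int) 1).map
          (fun i => distA pt (PySem.List.pyGetD pts i (0, 0))) ++
        List.replicate ((n - (k + 1)) * n) (0 : Int)
        = FB pts ((k : Int) + 1) ++ List.replicate ((n - (k + 1)) * n) (0 : Int) := by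
      rw [hmap, FB_succ, List.append_assoc (FB pts (k : Int)) (List.replicate k (0 : Int)), hrow]
    have hm' : (PySem.List.pyRange (k : Int) (n : Int) 1).foldl
        (fun acc i => if distA pt (PySem.List.pyGetD pts i (0, 0)) > acc
          then distA pt (PySem.List.pyGetD pts i (0, 0)) else acc) m
        = (PySem.List.pyRange (k : Int) (n : Int) 1).foldl
          (fun a2 j => if dP pts (k : Int) j > a2 then dP pts (k : Int) j else a2) m := by
      simp only [dP, gP, hgp]
    have hpts' : pts = (front ++ [pt]) ++ rest' := by
      rw [hpts]; simp
    have hih := ih (front ++ [pt])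
      ((PySem.List.pyRange (k : Int) (n : Int) 1).foldl
        (fun a2 j => if dP pts (k : Int) j > a2 then dP pts (k : Int) j else a2) m) hpts'
    have hlen1 : (front ++ [pt]).length = k + 1 := by simp [← hkdef]
    rw [hlen1] at hih
    have hcast : ((k + 1 : Nat) : Int) = (k : Int) + 1 := by push_cast; ring
    rw [hcast] at hih
    have hMF : MF pts (k : Int) m = MF pts ((k : Int) + 1)
        ((PySem.List.pyRange (k : Int) (n : Int) 1).foldl
          (fun a2 j => if dP pts (k : Int) j > a2 then dP pts (k : Int) j else a2) m) := by
      simp only [MF, ← hn]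
      conv_lhs => rw [PySem.List.pyRange_one_cons (show ((k : Nat) : Int) < ((n : Nat) : Int) by
        exact_mod_cast hk)]
      rw [List.foldl_cons]
    rw [hlist, hm', hMF]
    exact hih

theorem foldl_flatMap' {α β : Type} (g : β → Int → β) (f : α → List Int) :
    ∀ (l : List α) (init : β),
    (l.flatMap f).foldl g init = l.foldl (fun acc x => (f x).foldl g acc) init := by
  intro l
  induction l with
  | nil => intro init; rfl
  | cons x t ih => intro init; simp [List.flatMap_cons, List.foldl_append, ih]

theorem if_is_max (pts : List (Int × Int)) (i : Int) :
    (fun (a2 j : Int) => if dP pts i j > a2 then dP pts i j else a2)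
    = (fun (a2 j : Int) => max a2 (dP pts i j)) := by
  funext a2 j
  simp only [max_def]
  split <;> split <;> omega

theorem MF_eq_fold_TT (pts : List (Int × Int)) :
    MF pts 0 (-100) = (TT pts).foldl max (-100) := by
  simp only [MF, if_is_max, TT, foldl_flatMap']
  congr 1
  funext acc i
  rw [rowE, List.foldl_map]

theorem distA_max (p q : Int × Int) : distA p q = max |p.1 - q.1| |p.2 - q.2| := by
  simp only [distA, max_def]
  split <;> split <;> omega

theorem dP_comm (pts : List (Int × Int)) (i j : Int) : dP pts i j = dP pts j i := by
  simp only [dP, distA_max, abs_sub_comm]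

theorem mem_TT (pts : List (Int × Int)) (x : Int) :
    x ∈ TT pts ↔ ∃ i j : Int, 0 ≤ i ∧ i ≤ j ∧ j < (pts.length : Int) ∧ x = dP pts i j := by
  simp only [TT, List.mem_flatMap, rowE, List.mem_map, PySem.List.mem_pyRange_one]
  constructor
  · rintro ⟨i, ⟨hi0, hin⟩, j, ⟨hij, hjn⟩, rfl⟩
    exact ⟨i, j, hi0, hij, hjn, rfl⟩
  · rintro ⟨i, j, hi0, hij, hjn, rfl⟩
    exact ⟨i, ⟨hi0, by omega⟩, j, ⟨hij, hjn⟩, rfl⟩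

theorem gP_mem (pts : List (Int × Int)) (i : Int) (h0 : 0 ≤ i) (hn : i < (pts.length : Int)) :
    gP pts i ∈ pts := by
  obtain ⟨k, rfl⟩ := Int.eq_ofNat_of_zero_le h0
  have hk : k < pts.length := by exact_mod_cast hn
  simp only [gP, PySem.List.pyGetD_natCast, List.getD_eq_getElem?_getD, List.getElem?_eq_getElem hk]
  exact List.getElem_mem hk

theorem gP_at (pts : List (Int × Int)) (k : Nat) (hk : k < pts.length) :
    gP pts (k : Int) = pts[k] := by
  simp [gP, PySem.List.pyGetD_natCast, List.getD_eq_getElem?_getD, List.getElem?_eq_getElem hk]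

theorem foldl_max_le (b : Int) : ∀ (l : List Int) (a : Int), a ≤ b → (∀ x ∈ l, x ≤ b) →
    l.foldl max a ≤ b := by
  intro l
  induction l with
  | nil => intro a ha _; simpa using ha
  | cons x t ih =>
    intro a ha hall
    rw [List.foldl_cons]
    exact ih _ (max_le ha (hall x List.mem_cons_self)) (fun y hy => hall y (List.mem_cons_of_mem x hy))

-- the core of B's closed form: the running pairwise Chebyshev max equals the larger coordinate range
theorem max_closed (pts : List (Int × Int)) (Mx mx My my : Int)
    (hMx : PySem.List.max? (pts.map Prod.fst) (fun v => v) = some Mx)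
    (hmx : PySem.List.min? (pts.map Prod.fst) (fun v => v) = some mx)
    (hMy : PySem.List.max? (pts.map Prod.snd) (fun v => v) = some My)
    (hmy : PySem.List.min? (pts.map Prod.snd) (fun v => v) = some my) :
    MF pts 0 (-100) = max (Mx - mx) (My - my) := by
  have hxb : ∀ p ∈ pts, mx ≤ p.1 ∧ p.1 ≤ Mx := fun p hp =>
    ⟨PySem.List.min?_isMin hmx p.1 (List.mem_map_of_mem hp),
     PySem.List.max?_isMax hMx p.1 (List.mem_map_of_mem hp)⟩
  have hyb : ∀ p ∈ pts, my ≤ p.2 ∧ p.2 ≤ My := fun p hp =>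
    ⟨PySem.List.min?_isMin hmy p.2 (List.mem_map_of_mem hp),
     PySem.List.max?_isMax hMy p.2 (List.mem_map_of_mem hp)⟩
  have hMxm : Mx ∈ pts.map Prod.fst := PySem.List.max?_mem hMx
  have hmxm : mx ∈ pts.map Prod.fst := PySem.List.min?_mem hmx
  have hMym : My ∈ pts.map Prod.snd := PySem.List.max?_mem hMy
  have hmym : my ∈ pts.map Prod.snd := PySem.List.min?_mem hmy
  have hrx : 0 ≤ Mx - mx := by
    obtain ⟨p, hp, rfl⟩ := List.mem_map.mp hMxm
    have := (hxb p hp).1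
    omega
  have hry : 0 ≤ My - my := by
    obtain ⟨p, hp, rfl⟩ := List.mem_map.mp hMym
    have := (hyb p hp).1
    omega
  rw [MF_eq_fold_TT]
  apply le_antisymm
  · apply foldl_max_le
    · omega
    · intro x hx
      obtain ⟨i, j, hi0, hij, hjn, rfl⟩ := (mem_TT pts x).mp hx
      have hpi := gP_mem pts i hi0 (by omega)
      have hpj := gP_mem pts j (by omega) hjn
      have h1 := hxb _ hpi; have h2 := hxb _ hpj
      have h3 := hyb _ hpi; have h4 := hyb _ hpj
      simp only [dP, distA_max]
      apply max_le
      · exact le_trans (by rw [abs_sub_le_iff]; omega) (le_max_left _ _)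
      · exact le_trans (by rw [abs_sub_le_iff]; omega) (le_max_right _ _)
  · -- lower bound: exhibit a pair realizing each coordinate range
    have key : ∀ (f : Int × Int → Int) (v w : Int), v ∈ pts.map f → w ∈ pts.map f →
        (∀ i j : Int, |f (gP pts i) - f (gP pts j)| ≤ dP pts i j) →
        0 ≤ v - w →
        v - w ≤ (TT pts).foldl max (-100) := by
      intro f v w hv hw habs hvw
      obtain ⟨p, hp, rfl⟩ := List.mem_map.mp hv
      obtain ⟨q, hq, rfl⟩ := List.mem_map.mp hw
      obtain ⟨a, ha, hpa⟩ := List.mem_iff_getElem.mp hp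
      obtain ⟨b, hb, hqb⟩ := List.mem_iff_getElem.mp hq
      -- the unordered pair {a,b} as an in-triangle pair
      have helem : dP pts (↑(min a b)) (↑(max a b)) ∈ TT pts := by
        rw [mem_TT]
        refine ⟨(↑(min a b) : Int), (↑(max a b) : Int), by positivity, ?_, ?_, rfl⟩
        · exact_mod_cast (min_le_max : min a b ≤ max a b)
        · exact_mod_cast (show max a b < pts.length by omega)
      have hsym : dP pts (↑(min a b)) (↑(max a b)) = dP pts (↑a) (↑b) := by
        rcases Nat.le_total a b with h | h
        · rw [Nat.min_eq_left h, Nat.max_eq_right h]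
        · rw [Nat.min_eq_right h, Nat.max_eq_left h, dP_comm]
      have hge : f p - f q ≤ dP pts (↑a) (↑b) := by
        have h := habs (↑a) (↑b)
        rw [gP_at pts a ha, gP_at pts b hb, hpa, hqb] at h
        exact le_trans (le_abs_self _) h
      calc f p - f q ≤ dP pts (↑(min a b)) (↑(max a b)) := by rw [hsym]; exact hge
        _ ≤ (TT pts).foldl max (-100) := (PySem.List.le_foldl_max (TT pts) (-100)).2 _ helem
    apply max_le
    · exact key Prod.fst Mx mx hMxm hmxm
        (fun i j => by simp only [dP, distA_max]; exact le_max_left _ _) hrx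
    · exact key Prod.snd My my hMym hmym
        (fun i j => by simp only [dP, distA_max]; exact le_max_right _ _) hry

theorem flatMap_map_id {α : Type} (l : List α) (f : α → List Int) :
    (l.map f).flatMap (fun r => r) = l.flatMap f := by
  induction l with
  | nil => rfl
  | cons x t ih => simp only [List.map_cons, List.flatMap_cons, ih]

theorem flatMap_congr' {α : Type} (l : List α) (f g : α → List Int) (h : ∀ x ∈ l, f x = g x) :
    l.flatMap f = l.flatMap g := by
  induction l with
  | nil => rfl
  | cons x t ih =>
    simp only [List.flatMap_cons, h x List.mem_cons_self,
      ih (fun y hy => h y (List.mem_cons_of_mem x hy))]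

theorem FB_zero (pts : List (Int × Int)) : FB pts 0 = [] := by
  simp [FB, PySem.List.pyRange_one_eq_nil (le_refl (0 : Int))]

theorem dist_list_spec : Claim_equal_dist_list := by
  intro pts _
  show dist_list pts = dist_list_alt pts
  have hA := outerA pts pts [] (-100) (by simp)
  simp only [List.length_nil, Nat.cast_zero, Nat.sub_zero, FB_zero, List.nil_append] at hA
  dsimp only [dist_list, dist_list_alt]
  rw [hA]
  by_cases hnil : pts = []
  · subst hnil
    simp [MF, FB, PySem.List.pyRange_one_eq_nil (le_refl (0 : Int))]
  · rw [if_neg (by simpa [List.length_eq_zero_iff] using hnil)]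
    obtain ⟨Mx, hMx⟩ : ∃ v, PySem.List.max? (pts.map Prod.fst) (fun v => v) = some v := by
      cases h : PySem.List.max? (pts.map Prod.fst) (fun v => v) with
      | none => exact absurd ((PySem.List.max?_eq_none_iff _ _).mp h) (by simpa using hnil)
      | some v => exact ⟨v, rfl⟩
    obtain ⟨mx, hmx⟩ : ∃ v, PySem.List.min? (pts.map Prod.fst) (fun v => v) = some v := by
      cases h : PySem.List.min? (pts.map Prod.fst) (fun v => v) with
      | none => exact absurd ((PySem.List.min?_eq_none_iff _ _).mp h) (by simpa using hnil)
      | some v => exact ⟨v, rfl⟩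
    obtain ⟨My, hMy⟩ : ∃ v, PySem.List.max? (pts.map Prod.snd) (fun v => v) = some v := by
      cases h : PySem.List.max? (pts.map Prod.snd) (fun v => v) with
      | none => exact absurd ((PySem.List.max?_eq_none_iff _ _).mp h) (by simpa using hnil)
      | some v => exact ⟨v, rfl⟩
    obtain ⟨my, hmy⟩ : ∃ v, PySem.List.min? (pts.map Prod.snd) (fun v => v) = some v := by
      cases h : PySem.List.min? (pts.map Prod.snd) (fun v => v) with
      | none => exact absurd ((PySem.List.min?_eq_none_iff _ _).mp h) (by simpa using hnil)
      | some v => exact ⟨v, rfl⟩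
    rw [hMx, hmx, hMy, hmy]
    refine Prod.ext ?_ ?_
    · exact max_closed pts Mx mx My my hMx hmx hMy hmy
    · -- the list component: FB = the flattened rows
      show FB pts (pts.length : Int) = _
      rw [FB, flatMap_map_id]
      symm
      apply flatMap_congr'
      intro i hi
      obtain ⟨h0, hn⟩ := PySem.List.mem_pyRange_one.mp hi
      rw [rowB_eq pts i h0 (le_of_lt hn), rowE]
      congr 1
      apply List.map_congr_left
      intro j hj
      simp only [dP, gP, distA_max]
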